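-- pv_equiv track=rewrite | github.com/guilhermehencus/Python_Estrutura_Dados | Listas/Lista_Exercicios_3.py | situacao_aluno
-- ===== SOURCE A (Python) =====
-- def situacao_aluno(notas):
--     count_7 = 0
--     count_5_7 = 0
--     for x in notas:
--         if x >= 7:
--             count_7 = count_7+1
--         elif x >= 5 and x < 7:
--             count_5_7 += 1
--         else:
--             return "Reprovado direto"
--     if count_7 == 5:
--         return "Aprovado"
--     elif count_5_7 >= 1 and count_5_7 <= 2:
--         return "Conselho de classe"
--     elif count_5_7 > 2:
--         return "Reprovado"
-- ===== SOURCE B (Python) =====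
-- def situacao_aluno(notas):
--     if any(x < 5 for x in notas):
--         return "Reprovado direto"
--     count_7 = sum(1 for x in notas if x >= 7)
--     count_5_7 = sum(1 for x in notas if 5 <= x < 7)
--     if count_7 == 5:
--         return "Aprovado"
--     elif 1 <= count_5_7 <= 2:
--         return "Conselho de classe"
--     elif count_5_7 > 2:
--         return "Reprovado"
-- ===== Notes on version B (the rewrite author's own statement) =====
-- stated objective: simpler
-- what changed: Replaces A's single stateful loop with early return by a guard pass (any grade < 5) followed by two independent counting passes feeding the same final chain.
import Mathlib
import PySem

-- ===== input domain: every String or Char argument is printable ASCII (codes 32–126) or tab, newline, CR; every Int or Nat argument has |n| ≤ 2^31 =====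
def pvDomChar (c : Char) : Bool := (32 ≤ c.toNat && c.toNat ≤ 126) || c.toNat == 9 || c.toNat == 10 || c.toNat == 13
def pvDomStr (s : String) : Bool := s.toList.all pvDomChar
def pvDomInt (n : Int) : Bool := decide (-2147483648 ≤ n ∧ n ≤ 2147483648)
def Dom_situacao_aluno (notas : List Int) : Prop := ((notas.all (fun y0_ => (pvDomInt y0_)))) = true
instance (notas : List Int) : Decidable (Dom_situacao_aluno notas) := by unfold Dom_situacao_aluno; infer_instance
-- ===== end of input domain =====

-- B replaces A's single stateful loop (early return on a grade < 5) by a guard pass plus two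
-- independent counting passes feeding the same final chain: simpler decomposition, same O(n) cost.


-- ===== PORT A =====
-- Literal port of A: one loop carrying two counters, early return on a grade < 5.
def situacaoGoA : List Int → Int → Int → Option String
  | [], count_7, count_5_7 =>
    if count_7 = 5 then some "Aprovado"
    else if count_5_7 ≥ 1 ∧ count_5_7 ≤ 2 then some "Conselho de classe"
    else if count_5_7 > 2 then some "Reprovado"
    else none
  | x :: xs, count_7, count_5_7 =>
    if x ≥ 7 then situacaoGoA xs (count_7 + 1) count_5_7
    else if x ≥ 5 ∧ x < 7 then situacaoGoA xs count_7 (count_5_7 + 1)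
    else some "Reprovado direto"

def situacao_aluno (notas : List Int) : Option String :=
  situacaoGoA notas 0 0

-- ===== PORT B =====
-- B: guard pass for any grade < 5, then two independent counting passes.
def situacao_aluno_alt (notas : List Int) : Option String :=
  if notas.any (fun x => x < 5) then some "Reprovado direto"
  else
    let count_7 : Int := (notas.countP (fun x => decide (7 ≤ x)) : Int)
    let count_5_7 : Int := (notas.countP (fun x => decide (5 ≤ x ∧ x < 7)) : Int)
    if count_7 = 5 then some "Aprovado"
    else if 1 ≤ count_5_7 ∧ count_5_7 ≤ 2 then some "Conselho de classe"
    else if count_5_7 > 2 then some "Reprovado"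
    else none

-- ===== PRECONDITION & SPEC =====
def Spec_situacao_aluno (notas : List Int) (out : Option String) : Prop := out = situacao_aluno_alt notas
instance (notas : List Int) (out : Option String) : Decidable (Spec_situacao_aluno notas out) := by unfold Spec_situacao_aluno; infer_instance

-- ===== CLAIM (what is proved, stated in full; the proofs are below) =====
def Claim_equal_situacao_aluno : Prop := ∀ (notas : List Int), Dom_situacao_aluno notas → Spec_situacao_aluno notas (situacao_aluno notas)

-- ===== LEMMAS AND PROOFS =====

-- ===== VERDICT (by name: the statement is the Claim_ definition above) =====
theorem situacaoGoA_eq (xs : List Int) : ∀ (c7 c57 : Int),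
    situacaoGoA xs c7 c57 =
      if xs.any (fun x => x < 5) then some "Reprovado direto"
      else
        let t7 := c7 + (xs.countP (fun x => decide (7 ≤ x)) : Int)
        let t57 := c57 + (xs.countP (fun x => decide (5 ≤ x ∧ x < 7)) : Int)
        if t7 = 5 then some "Aprovado"
        else if 1 ≤ t57 ∧ t57 ≤ 2 then some "Conselho de classe"
        else if t57 > 2 then some "Reprovado"
        else none := by
  induction xs with
  | nil =>
    intro c7 c57
    simp [situacaoGoA]
  | cons x xs ih =>
    intro c7 c57
    by_cases hx7 : (7 : Int) ≤ x
    · have h1 : ¬ (x < 5) := by omega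
      have h2 : ¬ (5 ≤ x ∧ x < 7) := by omega
      rw [show situacaoGoA (x :: xs) c7 c57 = situacaoGoA xs (c7 + 1) c57 by
            simp [situacaoGoA, hx7], ih]
      simp only [List.any_cons, List.countP_cons, decide_eq_true_eq,
        decide_eq_false h1, decide_eq_false h2, Bool.false_or,
        if_pos hx7, if_neg h2, if_true, if_false]
      by_cases hany : xs.any (fun x => decide (x < 5)) = true
      · simp [hany]
      · simp only [hany, if_false, Bool.false_eq_true]
        push_cast
        split_ifs <;> first | rfl | omega
    · by_cases hx5 : (5 : Int) ≤ x
      · have hxlt : x < 7 := by omega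
        have h1 : ¬ (x < 5) := by omega
        have h2 : (5 ≤ x ∧ x < 7) := ⟨hx5, hxlt⟩
        rw [show situacaoGoA (x :: xs) c7 c57 = situacaoGoA xs c7 (c57 + 1) by
              simp [situacaoGoA, hx7, h2], ih]
        simp only [List.any_cons, List.countP_cons,
          decide_eq_false h1, decide_eq_false hx7, decide_eq_true h2, Bool.false_or]
        by_cases hany : xs.any (fun x => decide (x < 5)) = true
        · simp [hany]
        · simp only [hany, if_false, Bool.false_eq_true]
          push_cast
          split_ifs <;> first | rfl | omega
      · have hlt : x < 5 := by omega
        simp [situacaoGoA, hx7, hx5, hlt]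

theorem situacao_aluno_spec : Claim_equal_situacao_aluno := by
  intro notas _
  unfold Spec_situacao_aluno situacao_aluno situacao_aluno_alt
  rw [situacaoGoA_eq]
  simp
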